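-- pv_equiv track=rewrite | github.com/illogicalNetwork/TarkovLogChecker | tarkov_logs.py | manual_scan_json
-- ===== SOURCE A (Python) =====
-- def manual_scan_json(log_lines):
--     json_started = False
--     json_lines = []
--     bracket_level = 0
--     for line in log_lines:
--         if json_started:
--             bracket_level += line.count('{')
--             bracket_level -= line.count('}')
--             json_lines.append(line.strip())
--             if bracket_level == 0:
--                 yield '\n'.join(json_lines)
--                 json_lines = []
--                 json_started = False
--         elif "GroupMatchInviteAccept" in line:
--             json_started = True
-- ===== SOURCE B (Python) =====
-- def manual_scan_json(log_lines):
--     # Staged approach: precompute a prefix-sum array of brace balances once,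
--     # then jump between marker lines and the matching prefix-sum position.
--     prefix = [0]
--     for line in log_lines:
--         prefix.append(prefix[-1] + line.count('{') - line.count('}'))
--     n = len(log_lines)
--     i = 0
--     while i < n:
--         if "GroupMatchInviteAccept" in log_lines[i]:
--             j = i + 1
--             while j < n and prefix[j + 1] != prefix[i + 1]:
--                 j += 1
--             if j < n:
--                 yield '\n'.join(l.strip() for l in log_lines[i + 1:j + 1])
--             i = j + 1
--         else:
--             i += 1
-- ===== Notes on version B (the rewrite author's own statement) =====
-- stated objective: alternative
-- what changed: Replaces A's single stateful pass (mode flag + running bracket depth + incremental accumulator) by a staged algorithm: one pass precomputes a prefix-sum array of per-line brace balances, then an index-based scan finds each marker line and locates the block end as the next position with an equal prefix sum, extracting the block by slicing.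
import Mathlib
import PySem

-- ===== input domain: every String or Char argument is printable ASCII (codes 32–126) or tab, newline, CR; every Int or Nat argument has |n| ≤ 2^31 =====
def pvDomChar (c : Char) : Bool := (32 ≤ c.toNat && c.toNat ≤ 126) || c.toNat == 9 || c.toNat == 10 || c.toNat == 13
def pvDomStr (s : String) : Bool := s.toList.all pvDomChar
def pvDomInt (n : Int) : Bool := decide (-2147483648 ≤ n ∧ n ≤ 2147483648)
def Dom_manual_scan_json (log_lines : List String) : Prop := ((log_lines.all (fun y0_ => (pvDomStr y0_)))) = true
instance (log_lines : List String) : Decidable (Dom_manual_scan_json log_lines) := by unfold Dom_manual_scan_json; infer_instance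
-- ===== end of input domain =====

-- B replaces A's stateful depth-tracking pass by a staged algorithm: a precomputed
-- prefix-sum array of brace balances plus index jumps to the matching prefix-sum position
-- (objective: alternative, same cost). Equivalence is about the returned list only
-- (the Python originals are generators; they are compared as the list of yielded strings).

-- ===== PORT A =====
-- state = (json_started, json_lines, bracket_level, yielded-so-far)
def pvAStep (st : Bool × List String × Int × List String) (line : String) :
    Bool × List String × Int × List String :=
  match st with
  | (json_started, json_lines, bracket_level, out) =>
    if json_started then
      let bracket_level := bracket_level + (PySem.Str.count line "{" : Int)
      let bracket_level := bracket_level - (PySem.Str.count line "}" : Int)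
      let json_lines := json_lines ++ [PySem.Str.strip line]
      if bracket_level = 0 then
        (false, [], bracket_level, out ++ [PySem.Str.join "\n" json_lines])
      else (json_started, json_lines, bracket_level, out)
    else if PySem.Str.isIn "GroupMatchInviteAccept" line then
      (true, json_lines, bracket_level, out)
    else (json_started, json_lines, bracket_level, out)

def manual_scan_json (log_lines : List String) : List String :=
  (log_lines.foldl pvAStep (false, [], 0, [])).2.2.2

-- ===== PORT B =====
-- per-line brace balance line.count('{') - line.count('}')
def pvDelta (line : String) : Int :=
  (PySem.Str.count line "{" : Int) - (PySem.Str.count line "}" : Int)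

-- prefix = [0]; for line in log_lines: prefix.append(prefix[-1] + delta)
def pvPrefix (log_lines : List String) : List Int :=
  log_lines.foldl (fun p line => p ++ [(p.getLast?.getD 0) + pvDelta line]) [0]

-- while j < n and prefix[j+1] != target: j += 1   (returns the final j)
def pvFindJ (pre : List Int) (n : Nat) (target : Int) (j : Nat) : Nat :=
  if h : j < n then
    if pre.getD (j + 1) 0 ≠ target then pvFindJ pre n target (j + 1) else j
  else j
termination_by n - j

-- the loop index only increases (used by pvOuterIdx's termination)
theorem le_pvFindJ (pre : List Int) (n : Nat) (target : Int) (j : Nat) :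
    j ≤ pvFindJ pre n target j := by
  have key : ∀ (m k : Nat), n - k ≤ m → k ≤ pvFindJ pre n target k := by
    intro m
    induction m with
    | zero =>
      intro k hk
      unfold pvFindJ
      split_ifs with h1 h2
      · omega
      · exact le_refl k
      · exact le_refl k
    | succ m ihm =>
      intro k hk
      unfold pvFindJ
      split_ifs with h1 h2
      · have := ihm (k + 1) (by omega); omega
      · exact le_refl k
      · exact le_refl k
  exact key (n - j) j le_rfl

-- the outer index loop: while i < n: if marker in lines[i]: find j, maybe yield slice, i = j+1 else i += 1
def pvOuterIdx (lines : List String) (pre : List Int) (n i : Nat) : List String :=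
  if h : i < n then
    if PySem.Str.isIn "GroupMatchInviteAccept" (lines.getD i "") then
      let j := pvFindJ pre n (pre.getD (i + 1) 0) (i + 1)
      (if j < n then
        [PySem.Str.join "\n"
          ((PySem.List.slice lines (some ((i + 1 : Nat) : Int)) (some ((j + 1 : Nat) : Int))).map
            PySem.Str.strip)]
      else []) ++ pvOuterIdx lines pre n (j + 1)
    else pvOuterIdx lines pre n (i + 1)
  else []
termination_by n - i
decreasing_by
  · have := le_pvFindJ pre n (pre.getD (i + 1) 0) (i + 1); omega
  · omega

def manual_scan_json_alt (log_lines : List String) : List String :=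
  pvOuterIdx log_lines (pvPrefix log_lines) log_lines.length 0

-- ===== PRECONDITION & SPEC =====
def Spec_manual_scan_json (log_lines : List String) (out : List String) : Prop := out = manual_scan_json_alt log_lines
instance (log_lines : List String) (out : List String) : Decidable (Spec_manual_scan_json log_lines out) := by unfold Spec_manual_scan_json; infer_instance

-- ===== CLAIM =====
def Claim_equal_manual_scan_json : Prop := ∀ (log_lines : List String), Dom_manual_scan_json log_lines → Spec_manual_scan_json log_lines (manual_scan_json log_lines)

-- ===== LEMMAS AND PROOFS =====

-- proof-side intermediate: A's fold rephrased as nested structural recursion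
mutual
def pvBOuter : List String → List String
  | [] => []
  | line :: it =>
    if PySem.Str.isIn "GroupMatchInviteAccept" line then pvBInner it [] 0
    else pvBOuter it
def pvBInner : List String → List String → Int → List String
  | [], _, _ => []
  | inner :: it, json_lines, bracket_level =>
    let bracket_level := bracket_level + pvDelta inner
    let json_lines := json_lines ++ [PySem.Str.strip inner]
    if bracket_level = 0 then PySem.Str.join "\n" json_lines :: pvBOuter it
    else pvBInner it json_lines bracket_level
end

theorem pv_key (ls : List String) :
    (∀ out, (ls.foldl pvAStep (false, [], 0, out)).2.2.2 = out ++ pvBOuter ls) ∧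
    (∀ jl b out, (ls.foldl pvAStep (true, jl, b, out)).2.2.2 = out ++ pvBInner ls jl b) := by
  induction ls with
  | nil => simp [pvBOuter, pvBInner]
  | cons line rest ih =>
    constructor
    · intro out
      by_cases hm : PySem.Str.isIn "GroupMatchInviteAccept" line = true
      · simp only [List.foldl_cons, pvAStep, Bool.false_eq_true, if_false, hm, if_true, pvBOuter]
        exact ih.2 [] 0 out
      · simp only [List.foldl_cons, pvAStep, Bool.false_eq_true, if_false, hm, pvBOuter]
        exact ih.1 out
    · intro jl b out
      by_cases hz : b + pvDelta line = 0
      · rw [List.foldl_cons]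
        have hz' : b + (PySem.Chars.count line.toList ['{'] : Int)
            - (PySem.Chars.count line.toList ['}'] : Int) = 0 := by
          simp [pvDelta] at hz; omega
        have hstep : pvAStep (true, jl, b, out) line
            = (false, [], 0,
               out ++ [PySem.Str.join "\n" (jl ++ [PySem.Str.strip line])]) := by
          simp only [pvAStep]
          simp [hz']
        rw [hstep, ih.1]
        simp [pvBInner, hz]
      · rw [List.foldl_cons]
        have hz' : ¬ (b + (PySem.Chars.count line.toList ['{'] : Int)
            - (PySem.Chars.count line.toList ['}'] : Int) = 0) := by
          simp [pvDelta] at hz; omega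
        have hstep : pvAStep (true, jl, b, out) line
            = (true, jl ++ [PySem.Str.strip line], b + pvDelta line, out) := by
          simp only [pvAStep]
          simp [hz', pvDelta]
          omega
        rw [hstep, ih.2]
        simp [pvBInner, hz]

-- prefix sums as a scan
def pvScan : List String → Int → List Int
  | [], a => [a]
  | line :: ls, a => a :: pvScan ls (a + pvDelta line)

theorem pvScan_foldl (ls : List String) :
    ∀ (acc : List Int) (a : Int),
      ls.foldl (fun p line => p ++ [(p.getLast?.getD 0) + pvDelta line]) (acc ++ [a])
        = acc ++ pvScan ls a := by
  induction ls with
  | nil => intro acc a; simp [pvScan]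
  | cons line rest ih =>
    intro acc a
    have : (acc ++ [a]) ++ [((acc ++ [a]).getLast?.getD 0) + pvDelta line]
        = (acc ++ [a]) ++ [a + pvDelta line] := by simp
    simp only [List.foldl_cons, this]
    have := ih (acc ++ [a]) (a + pvDelta line)
    simpa [pvScan] using this

theorem pvPrefix_eq (ls : List String) : pvPrefix ls = pvScan ls 0 := by
  have := pvScan_foldl ls [] 0
  simpa [pvPrefix] using this

theorem pvScan_getD (ls : List String) :
    ∀ (a : Int) (k : Nat), k ≤ ls.length →
      (pvScan ls a).getD k 0 = a + ((ls.take k).map pvDelta).sum := by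
  induction ls with
  | nil =>
    intro a k hk
    have hk0 : k = 0 := by simpa using hk
    subst hk0; simp [pvScan]
  | cons line rest ih =>
    intro a k hk
    cases k with
    | zero => simp [pvScan]
    | succ k =>
      simp only [pvScan, List.getD_cons_succ, List.take_succ_cons, List.map_cons, List.sum_cons]
      rw [ih (a + pvDelta line) k (by simpa using hk)]
      ring

theorem pvScan_step (ls : List String) (k : Nat) (hk : k < ls.length) :
    (pvScan ls 0).getD (k + 1) 0 = (pvScan ls 0).getD k 0 + pvDelta ls[k] := by
  rw [pvScan_getD ls 0 k (by omega), pvScan_getD ls 0 (k + 1) (by omega),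
    List.map_take, List.map_take, List.take_add_one, List.sum_append]
  simp [hk]

theorem pvOuterIdx_ge (lines : List String) (pre : List Int) (n i : Nat) (h : n ≤ i) :
    pvOuterIdx lines pre n i = [] := by
  unfold pvOuterIdx
  simp [show ¬ i < n by omega]

-- the combined induction: outer equality and inner equality, descending on n - pos
theorem pv_main (lines : List String) :
    ∀ (m pos : Nat), lines.length - pos ≤ m →
      (pvOuterIdx lines (pvScan lines 0) lines.length pos = pvBOuter (lines.drop pos)) ∧
      (pos ≤ lines.length → ∀ (t : Int) (jl : List String),
        pvBInner (lines.drop pos) jl ((pvScan lines 0).getD pos 0 - t)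
          = (if pvFindJ (pvScan lines 0) lines.length t pos < lines.length then
              PySem.Str.join "\n" (jl ++ ((lines.drop pos).take
                  (pvFindJ (pvScan lines 0) lines.length t pos + 1 - pos)).map PySem.Str.strip)
                :: pvOuterIdx lines (pvScan lines 0) lines.length
                    (pvFindJ (pvScan lines 0) lines.length t pos + 1)
             else [])) := by
  intro m
  set n := lines.length with hn
  set P := pvScan lines 0 with hP
  induction m with
  | zero =>
    intro pos hpos
    have hge : n ≤ pos := by omega
    constructor
    · rw [pvOuterIdx_ge lines P n pos hge, List.drop_eq_nil_of_le (by omega), pvBOuter]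
    · intro hle t jl
      have : pos = n := by omega
      rw [List.drop_eq_nil_of_le (by omega)]
      unfold pvFindJ
      simp [show ¬ pos < n by omega, pvBInner]
  | succ m ih =>
    intro pos hpos
    by_cases hlt : pos < n
    case neg =>
      constructor
      · rw [pvOuterIdx_ge lines P n pos (by omega), List.drop_eq_nil_of_le (by omega), pvBOuter]
      · intro hle t jl
        rw [List.drop_eq_nil_of_le (by omega)]
        unfold pvFindJ
        simp [show ¬ pos < n by omega, pvBInner]
    case pos =>
      have hdrop : lines.drop pos = lines[pos] :: lines.drop (pos + 1) :=
        List.drop_eq_getElem_cons hlt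
      have ihn := ih (pos + 1) (by omega)
      constructor
      · -- OUTER
        rw [hdrop]
        unfold pvOuterIdx
        rw [pvBOuter]
        simp only [dif_pos hlt]
        rw [List.getD_eq_getElem lines "" hlt]
        by_cases hm : PySem.Str.isIn "GroupMatchInviteAccept" lines[pos] = true
        · simp only [hm, if_true]
          have hinner := ihn.2 (by omega) (P.getD (pos + 1) 0) []
          rw [show P.getD (pos + 1) 0 - P.getD (pos + 1) 0 = 0 by ring] at hinner
          rw [hinner]
          set j := pvFindJ P n (P.getD (pos + 1) 0) (pos + 1) with hj
          by_cases hjn : j < n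
          · simp only [if_pos hjn]
            have hslice : PySem.List.slice lines (some ((pos + 1 : Nat) : Int))
                (some ((j + 1 : Nat) : Int)) = (lines.drop (pos + 1)).take (j + 1 - (pos + 1)) :=
              PySem.List.slice_natCast lines (pos + 1) (j + 1)
            rw [hslice]
            simp
          · simp only [if_neg hjn]
            have hj1 : j + 1 ≥ n := by omega
            rw [pvOuterIdx_ge lines P n (j + 1) hj1]
            simp
        · simp only [hm, if_false, Bool.false_eq_true]
          exact ihn.1
      · -- INNER
        intro _ t jl
        rw [hdrop, pvBInner]
        have hstep : P.getD pos 0 - t + pvDelta lines[pos] = P.getD (pos + 1) 0 - t := by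
          have := pvScan_step lines pos hlt
          rw [← hP] at this
          omega
        rw [hstep]
        conv_rhs => rw [pvFindJ]
        simp only [dif_pos hlt]
        by_cases hz : P.getD (pos + 1) 0 - t = 0
        · -- block ends here: prefix[pos+1] == target
          have ht : ¬ (P.getD (pos + 1) 0 ≠ t) := by omega
          rw [if_pos hz, if_neg ht, if_pos hlt]
          rw [show pos + 1 - pos = 1 by omega]
          simp only [List.take_succ_cons, List.take_zero, List.map_cons, List.map_nil]
          rw [ihn.1]
        · -- keep scanning
          simp only [if_neg hz, if_pos (show P.getD (pos + 1) 0 ≠ t from by omega)]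
          have hinner := ihn.2 (by omega) t (jl ++ [PySem.Str.strip lines[pos]])
          rw [hinner]
          set j := pvFindJ P n t (pos + 1) with hj
          have hjge : pos + 1 ≤ j := le_pvFindJ P n t (pos + 1)
          by_cases hjn : j < n
          · simp only [if_pos hjn]
            congr 1
            rw [show j + 1 - pos = (j + 1 - (pos + 1)) + 1 by omega]
            simp
            rw [List.drop_eq_getElem_cons
              (show pos < (List.map PySem.Str.strip lines).length by simpa using hlt)]
            rw [List.take_succ_cons, List.getElem_map]
          · simp [hjn]

-- ===== VERDICT =====
theorem manual_scan_json_spec : Claim_equal_manual_scan_json := by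
  intro log_lines _
  unfold Spec_manual_scan_json manual_scan_json manual_scan_json_alt
  rw [pvPrefix_eq]
  have h1 := (pv_key log_lines).1 []
  have h2 := (pv_main log_lines log_lines.length 0 (by omega)).1
  simp only [List.drop_zero] at h2
  rw [h2]
  simpa using h1
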